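-- pv_equiv track=rewrite | github.com/iiixi311/pythoncipher | huanlv_code_Caesar.py | encrypt
-- ===== SOURCE A (Python) =====
-- def encrypt(key,change,plaintext):
-- 	result = ""
-- 	for c in plaintext:
-- 		try:
-- 			position = (key.index(c)+change) % len(key)
-- 			result += key[position]
-- 		except Exception:
-- 			result += c
-- 	return result
-- ===== SOURCE B (Python) =====
-- def encrypt(key, change, plaintext):
--     table = {}
--     n = len(key)
--     for i, c in enumerate(key):
--         o = ord(c)
--         if o not in table:
--             table[o] = key[(i + change) % n]
--     return plaintext.translate(table)
-- ===== Notes on version B (the rewrite author's own statement) =====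
-- stated objective: idiomatic
-- what changed: Replaces A's per-character key.index scan inside a try/except with a substitution table built once from the key (first occurrence wins, key[(i+change)%n] precomputed per key char) and a single str.translate call.
import Mathlib
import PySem

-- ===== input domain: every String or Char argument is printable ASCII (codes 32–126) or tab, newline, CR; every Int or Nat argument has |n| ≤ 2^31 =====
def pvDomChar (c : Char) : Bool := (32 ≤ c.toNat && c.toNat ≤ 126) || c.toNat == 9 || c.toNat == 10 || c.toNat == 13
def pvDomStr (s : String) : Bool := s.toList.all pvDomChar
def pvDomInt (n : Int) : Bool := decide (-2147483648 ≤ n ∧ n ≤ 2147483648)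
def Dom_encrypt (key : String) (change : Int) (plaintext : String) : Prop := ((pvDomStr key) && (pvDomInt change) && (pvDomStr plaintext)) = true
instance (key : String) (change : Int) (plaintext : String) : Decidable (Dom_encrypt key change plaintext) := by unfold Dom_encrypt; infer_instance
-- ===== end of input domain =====

-- B replaces A's per-character key.index scan + try/except with a substitution table
-- built once from the key (first occurrence wins) and a single translate pass (objective: idiomatic).

-- ===== PORT A =====
-- per-character loop: try position = (key.index(c)+change) % len(key); result += key[position]
-- except Exception: result += c   (index? none = ValueError; pyGet? none would be the other exceptions)
def encrypt (key : String) (change : Int) (plaintext : String) : String :=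
  String.mk (plaintext.toList.foldl (fun result c =>
    match PySem.List.index? key.toList c with
    | some i =>
      match PySem.List.pyGet? key.toList (PySem.Int.mod ((i : Int) + change) key.toList.length) with
      | some ch => result ++ [ch]
      | none => result ++ [c]
    | none => result ++ [c]) [])

-- ===== PORT B =====
-- table built over enumerate(key), first occurrence wins; key[(i+change)%n] is always in
-- range when the loop body runs (key nonempty), so pyGetD's default is never used (exact).
def encryptTable (ks : List Char) (change : Int) : PySem.Dict Char Char :=
  (PySem.List.enumerate ks).foldl (fun d p =>
    if d.contains p.2 then d
    else d.insert p.2 (PySem.List.pyGetD ks (PySem.Int.mod (p.1 + change) ks.length) p.2)) PySem.Dict.empty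

def encrypt_alt (key : String) (change : Int) (plaintext : String) : String :=
  String.mk (plaintext.toList.map (fun c => ((encryptTable key.toList change).get? c).getD c))

-- ===== PRECONDITION & SPEC =====
def Spec_encrypt (key : String) (change : Int) (plaintext : String) (out : String) : Prop := out = encrypt_alt key change plaintext
instance (key : String) (change : Int) (plaintext : String) (out : String) : Decidable (Spec_encrypt key change plaintext out) := by unfold Spec_encrypt; infer_instance

-- ===== CLAIM (what is proved, stated in full; the proofs are below) =====
def Claim_equal_encrypt : Prop := ∀ (key : String) (change : Int) (plaintext : String), Dom_encrypt key change plaintext → Spec_encrypt key change plaintext (encrypt key change plaintext)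

-- ===== LEMMAS AND PROOFS =====

-- generic shape of B's table-building fold, for an arbitrary initial dict
theorem tblFold_get? (f : Int → Char → Char) (c : Char) :
    ∀ (l : List (Int × Char)) (d : PySem.Dict Char Char),
    (l.foldl (fun d p => if d.contains p.2 then d else d.insert p.2 (f p.1 p.2)) d).get? c
      = ((d.get? c).orElse (fun _ => (l.find? (fun p => p.2 == c)).map (fun p => f p.1 p.2))) := by
  intro l
  induction l with
  | nil => intro d; simp
  | cons p t ih =>
    intro d
    simp only [List.foldl_cons]
    by_cases hc : d.contains p.2
    · rw [if_pos hc, ih]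
      by_cases hpc : p.2 = c
      · have : d.get? c ≠ none := by
          rw [PySem.Dict.contains_eq_isSome_get?] at hc
          subst hpc; simpa [Option.isSome_iff_ne_none] using hc
        cases hdg : d.get? c with
        | none => exact absurd hdg this
        | some v => simp [Option.orElse]
      · simp [beq_iff_eq, hpc]
    · rw [if_neg hc, ih]
      have hdn : d.get? c = none ∨ p.2 ≠ c := by
        by_cases hpc : p.2 = c
        · left
          rw [PySem.Dict.contains_eq_isSome_get?] at hc
          subst hpc; simpa [Option.isSome_iff_ne_none] using hc
        · right; exact hpc
      by_cases hpc : p.2 = c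
      · have hdg : d.get? c = none := hdn.resolve_right (by simp [hpc])
        subst hpc
        rw [PySem.Dict.get?_insert_self]
        simp [hdg, Option.orElse]
      · rw [PySem.Dict.get?_insert_of_ne d (f p.1 p.2) (Ne.symm hpc)]
        simp [beq_iff_eq, hpc]

-- find? of the matching pair in enumerate = first index of the char
theorem find?_enumerate_eq_index? (c : Char) :
    ∀ (ks : List Char) (s : Int),
    (PySem.List.enumerate ks s).find? (fun p => p.2 == c)
      = (PySem.List.index? ks c).map (fun i => (s + (i : Int), c)) := by
  intro ks
  induction ks with
  | nil => intro s; simp [PySem.List.enumerate]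
  | cons x t ih =>
    intro s
    rw [PySem.List.enumerate_cons]
    by_cases hx : x = c
    · subst hx
      rw [PySem.List.index?_cons_self]
      simp
    · rw [PySem.List.index?_cons_of_ne t hx, List.find?_cons]
      have hbeq : (x == c) = false := by simp [hx]
      simp only [hbeq, ih (s + 1)]
      cases PySem.List.index? t c with
      | none => simp
      | some i => simp; ring

-- per-character agreement: B's table lookup = A's index/mod/get computation
theorem table_lookup_eq (ks : List Char) (change : Int) (c : Char) :
    (((encryptTable ks change).get? c).getD c)
      = (match PySem.List.index? ks c with
         | some i =>
           match PySem.List.pyGet? ks (PySem.Int.mod ((i : Int) + change) ks.length) with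
           | some ch => ch
           | none => c
         | none => c) := by
  unfold encryptTable
  rw [tblFold_get? (fun i x => PySem.List.pyGetD ks (PySem.Int.mod (i + change) ks.length) x) c, find?_enumerate_eq_index? c ks 0]
  cases hix : PySem.List.index? ks c with
  | none => simp [Option.orElse]
  | some i =>
    have hmem : c ∈ ks := (PySem.List.index?_isSome_iff ks c).mp (by rw [hix]; rfl)
    have hlen : 0 < (ks.length : Int) := by
      have : ks ≠ [] := by rintro rfl; simp at hmem
      have := List.length_pos_of_ne_nil this
      exact_mod_cast this
    have h0 : (0:Int) ≤ PySem.Int.mod ((i : Int) + change) ks.length :=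
      PySem.Int.mod_nonneg _ hlen
    have h1 : PySem.Int.mod ((i : Int) + change) ks.length < (ks.length : Int) :=
      PySem.Int.mod_lt _ hlen
    have hget : PySem.List.pyGet? ks (PySem.Int.mod ((i : Int) + change) ks.length)
        = some (ks[(PySem.Int.mod ((i : Int) + change) ks.length).toNat]'(by omega)) :=
      PySem.List.pyGet?_eq_some_getElem ks h0 (by simpa using h1)
    simp [hget, Option.orElse, PySem.List.pyGetD_eq_getElem ks c h0 (by simpa using h1)]

-- A's accumulator loop, rewritten as a map
theorem encrypt_eq_map (key : String) (change : Int) (plaintext : String) :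
    encrypt key change plaintext
      = String.mk (plaintext.toList.map (fun c =>
          match PySem.List.index? key.toList c with
          | some i =>
            match PySem.List.pyGet? key.toList (PySem.Int.mod ((i : Int) + change) key.toList.length) with
            | some ch => ch
            | none => c
          | none => c)) := by
  unfold encrypt
  have hfun : (fun (result : List Char) (c : Char) =>
      match PySem.List.index? key.toList c with
      | some i =>
        match PySem.List.pyGet? key.toList (PySem.Int.mod ((i : Int) + change) key.toList.length) with
        | some ch => result ++ [ch]
        | none => result ++ [c]
      | none => result ++ [c])
    = (fun (result : List Char) (c : Char) => result ++ [
        match PySem.List.index? key.toList c with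
        | some i =>
          match PySem.List.pyGet? key.toList (PySem.Int.mod ((i : Int) + change) key.toList.length) with
          | some ch => ch
          | none => c
        | none => c]) := by
    funext r c
    cases PySem.List.index? key.toList c with
    | none => rfl
    | some i =>
      cases h2 : PySem.List.pyGet? key.toList (PySem.Int.mod ((i : Int) + change) key.toList.length) <;>
          (rw [String.length_toList] at h2; simp [h2])
  rw [hfun, show ∀ (l : List Char) (g : Char → Char),
        (l.foldl (fun (r : List Char) c => r ++ [g c]) []) = l.map g from
      fun l g => by simpa using PySem.List.foldl_append_singleton_eq_map (l := l) (f := g) (acc := [])]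

-- ===== VERDICT (by name: the statement is the Claim_ definition above) =====
theorem encrypt_spec : Claim_equal_encrypt := by
  intro key change plaintext _
  unfold Spec_encrypt encrypt_alt
  rw [encrypt_eq_map]
  congr 1
  apply List.map_congr_left
  intro c _
  exact (table_lookup_eq key.toList change c).symm
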